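-- pv_equiv track=rewrite | github.com/Ravi2257/Python_CSCI-6651 | Assignment-2.py | any_possible_word
-- ===== SOURCE A (Python) =====
-- def any_possible_word(possible_words):
--
--     vowels = "aeiou"
--     for i in range(len(possible_words) - 2):
--         if (possible_words[i] not in vowels and
--             possible_words[i+1] in vowels and
--             possible_words[i+2] not in vowels):
--             return True
--     return False
-- ===== SOURCE B (Python) =====
-- def any_possible_word(possible_words):
--     # DFA over the characters: state 0 = no useful suffix, 1 = last char was a
--     # consonant, 2 = last two chars were consonant then vowel; a consonant seen
--     # in state 2 completes the consonant-vowel-consonant pattern.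
--     vowels = "aeiou"
--     state = 0
--     for ch in possible_words:
--         if ch in vowels:
--             state = 2 if state == 1 else 0
--         else:
--             if state == 2:
--                 return True
--             state = 1
--     return False
-- ===== Notes on version B (the rewrite author's own statement) =====
-- stated objective: alternative
-- what changed: B replaces A's index-based sliding-window scan (three membership tests per position with lookahead) by a 3-state finite automaton that consumes one character at a time with no indexing or lookahead, accepting when a consonant arrives in the consonant-then-vowel state.
import Mathlib
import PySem

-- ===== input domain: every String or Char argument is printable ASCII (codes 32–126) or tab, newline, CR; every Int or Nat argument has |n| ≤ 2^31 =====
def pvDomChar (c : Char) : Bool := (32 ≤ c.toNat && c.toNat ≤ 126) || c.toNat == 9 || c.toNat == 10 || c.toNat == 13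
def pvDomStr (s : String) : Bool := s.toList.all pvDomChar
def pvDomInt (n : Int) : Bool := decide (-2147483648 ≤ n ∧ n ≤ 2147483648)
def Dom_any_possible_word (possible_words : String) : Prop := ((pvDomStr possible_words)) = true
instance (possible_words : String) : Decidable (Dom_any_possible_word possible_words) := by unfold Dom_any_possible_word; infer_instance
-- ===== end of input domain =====

-- B is a 3-state finite automaton consuming one character at a time (no indexing, no
-- lookahead) instead of A's index-based sliding-window triple test: alternative decomposition, same cost.

-- ===== PORT A =====
def pvVowels : List Char := ['a', 'e', 'i', 'o', 'u']

-- A's for-loop with early return over range(len-2); indices are always in range in Python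
-- (so the pyGetD default is never read).
def pvALoop (s : List Char) : List Int → Bool
  | [] => false
  | i :: rest =>
    if (!pvVowels.contains (PySem.List.pyGetD s i ' ')
        && pvVowels.contains (PySem.List.pyGetD s (i + 1) ' ')
        && !pvVowels.contains (PySem.List.pyGetD s (i + 2) ' ')) then
      true
    else
      pvALoop s rest

def any_possible_word (possible_words : String) : Bool :=
  let cs := possible_words.toList
  pvALoop cs (PySem.List.pyRange 0 ((cs.length : Int) - 2) 1)

-- ===== PORT B =====
-- the automaton loop of Source B: state 0 = no useful suffix, 1 = last char consonant,
-- 2 = last two chars consonant then vowel; early return on a consonant in state 2.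
def pvBLoop : Nat → List Char → Bool
  | _, [] => false
  | st, c :: t =>
    if pvVowels.contains c then pvBLoop (if st == 1 then 2 else 0) t
    else if st == 2 then true
    else pvBLoop 1 t

def any_possible_word_alt (possible_words : String) : Bool :=
  pvBLoop 0 possible_words.toList

-- ===== PRECONDITION & SPEC =====
def Spec_any_possible_word (possible_words : String) (out : Bool) : Prop := out = any_possible_word_alt possible_words
instance (possible_words : String) (out : Bool) : Decidable (Spec_any_possible_word possible_words out) := by unfold Spec_any_possible_word; infer_instance

-- ===== CLAIM (what is proved, stated in full; the proofs are below) =====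
def Claim_equal_any_possible_word : Prop := ∀ (possible_words : String), Dom_any_possible_word possible_words → Spec_any_possible_word possible_words (any_possible_word possible_words)

-- ===== LEMMAS AND PROOFS =====

-- common structural recursion both ports are reduced to
def pvRec : List Char → Bool
  | a :: b :: c :: t =>
      (!pvVowels.contains a && pvVowels.contains b && !pvVowels.contains c) || pvRec (b :: c :: t)
  | _ => false

-- shifting every index up by one while consing a char leaves the A-loop unchanged
theorem pvALoop_shift (a : Char) (s : List Char) (l : List Nat) :
    pvALoop (a :: s) (l.map (fun k => ((k : Nat) : Int) + 1)) = pvALoop s (l.map (fun k => ((k : Nat) : Int))) := by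
  induction l with
  | nil => rfl
  | cons k t ih =>
      simp only [List.map_cons, pvALoop]
      rw [show ((k : Int) + 2) = ((k + 2 : Nat) : Int) from by push_cast; ring]
      rw [show ((k : Int) + 1) = ((k + 1 : Nat) : Int) from by push_cast; ring]
      rw [show (((k + 1 : Nat) : Int) + 1) = ((k + 2 : Nat) : Int) from by push_cast; ring]
      rw [show (((k + 1 : Nat) : Int) + 2) = ((k + 3 : Nat) : Int) from by push_cast; ring]
      simp only [PySem.List.pyGetD_natCast]
      rw [show ((k : Nat) + 3) = ((k + 2) + 1) from rfl]
      rw [show ((k : Nat) + 2) = ((k + 1) + 1) from rfl]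
      simp only [List.getD_cons_succ]
      split_ifs
      · rfl
      · exact ih

theorem pvA_eq_rec (cs : List Char) :
    pvALoop cs (PySem.List.pyRange 0 ((cs.length : Int) - 2) 1) = pvRec cs := by
  induction cs with
  | nil => rfl
  | cons a s ih =>
      match s with
      | [] => rfl
      | [b] => rfl
      | b :: c :: t =>
          have hlen : ((a :: b :: c :: t).length : Int) - 2 = ((t.length + 1 : Nat) : Int) := by
            simp only [List.length_cons]; push_cast; ring
          rw [hlen, PySem.List.pyRange_zero_natCast, List.range_succ_eq_map]
          simp only [List.map_cons, pvALoop, List.map_map]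
          rw [show (((0 : Nat) : Int) + 1) = ((1 : Nat) : Int) from by omega]
          rw [show (((0 : Nat) : Int) + 2) = ((2 : Nat) : Int) from by omega]
          simp only [PySem.List.pyGetD_natCast]
          rw [show ((fun k : Nat => ((k : Nat) : Int)) ∘ Nat.succ) = (fun k : Nat => ((k : Nat) : Int) + 1) from by
                funext k; simp [Function.comp, Nat.succ_eq_add_one]]
          have hrest : pvALoop (b :: c :: t) ((List.range t.length).map (fun k => ((k : Nat) : Int))) =
              pvRec (b :: c :: t) := by
            have hlen' : (((b :: c :: t).length : Int) - 2) = ((t.length : Nat) : Int) := by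
              simp only [List.length_cons]; push_cast; ring
            have h := ih
            rw [hlen', PySem.List.pyRange_zero_natCast] at h
            exact h
          simp only [List.getD_cons_zero, List.getD_cons_succ, pvRec]
          cases hC : (!pvVowels.contains a && pvVowels.contains b && !pvVowels.contains c) with
          | true => simp
          | false =>
              simp only [Bool.false_eq_true, if_false, Bool.false_or]
              rw [pvALoop_shift a (b :: c :: t) (List.range t.length), hrest]

-- meaning of the three automaton states, proved simultaneously:
-- head2 cs = cs starts with vowel-then-consonant, head1 cs = cs starts with a consonant
def pvHead2 : List Char → Bool
  | b :: c :: _ => pvVowels.contains b && !pvVowels.contains c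
  | _ => false

def pvHead1 : List Char → Bool
  | c :: _ => !pvVowels.contains c
  | [] => false

theorem pvB_states (cs : List Char) :
    pvBLoop 0 cs = pvRec cs ∧
    pvBLoop 1 cs = (pvHead2 cs || pvRec cs) ∧
    pvBLoop 2 cs = (pvHead1 cs || pvRec cs) := by
  induction cs with
  | nil => exact ⟨rfl, rfl, rfl⟩
  | cons a t ih =>
      obtain ⟨ih0, ih1, ih2⟩ := ih
      by_cases hv : pvVowels.contains a = true
      · have hm : (decide (a ∈ pvVowels)) = true := by simpa using hv
        refine ⟨?_, ?_, ?_⟩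
        · show pvBLoop 0 (a :: t) = pvRec (a :: t)
          simp only [pvBLoop, hv, if_true]
          rw [show ((if (0 : Nat) == 1 then 2 else 0) = (0 : Nat)) from rfl, ih0]
          match t with
          | [] => simp [pvRec]
          | [b] => rfl
          | b :: c :: t' => simp [pvRec, hm]
        · show pvBLoop 1 (a :: t) = (pvHead2 (a :: t) || pvRec (a :: t))
          simp only [pvBLoop, hv, if_true]
          rw [show ((if (1 : Nat) == 1 then 2 else 0) = (2 : Nat)) from rfl, ih2]
          match t with
          | [] => simp [pvHead2, pvHead1, pvRec]
          | [b] => simp [pvHead2, pvHead1, pvRec, hm]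
          | b :: c :: t' => simp [pvHead2, pvHead1, pvRec, hm]
        · show pvBLoop 2 (a :: t) = (pvHead1 (a :: t) || pvRec (a :: t))
          simp only [pvBLoop, hv, if_true]
          rw [show ((if (2 : Nat) == 1 then 2 else 0) = (0 : Nat)) from rfl, ih0]
          match t with
          | [] => simp [pvHead1, pvRec, hm]
          | [b] => simp [pvHead1, pvRec, hm]
          | b :: c :: t' => simp [pvHead1, pvRec, hm]
      · have hv' : pvVowels.contains a = false := by simpa using hv
        have hm : (decide (a ∈ pvVowels)) = false := by simpa using hv'
        refine ⟨?_, ?_, ?_⟩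
        · show pvBLoop 0 (a :: t) = pvRec (a :: t)
          simp only [pvBLoop, hv']
          rw [show (((0 : Nat) == 2) = false) from rfl]
          simp only [Bool.false_eq_true, if_false, ih1]
          match t with
          | [] => simp [pvHead2, pvRec]
          | [b] => simp [pvHead2, pvRec]
          | b :: c :: t' => simp [pvHead2, pvRec, hm]
        · show pvBLoop 1 (a :: t) = (pvHead2 (a :: t) || pvRec (a :: t))
          simp only [pvBLoop, hv']
          rw [show (((1 : Nat) == 2) = false) from rfl]
          simp only [Bool.false_eq_true, if_false, ih1]
          match t with
          | [] => simp [pvHead2, pvRec]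
          | [b] => simp [pvHead2, pvRec, hm]
          | b :: c :: t' => simp [pvHead2, pvRec, hm]
        · show pvBLoop 2 (a :: t) = (pvHead1 (a :: t) || pvRec (a :: t))
          simp only [pvBLoop, hv']
          rw [show (((2 : Nat) == 2) = true) from rfl]
          simp [pvHead1, hm]

-- ===== VERDICT (by name: the statement is the Claim_ definition above) =====
theorem any_possible_word_spec : Claim_equal_any_possible_word := by
  intro s _
  unfold Spec_any_possible_word any_possible_word any_possible_word_alt
  simp only []
  rw [pvA_eq_rec, (pvB_states s.toList).1]
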